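-- pv_equiv track=rewrite | github.com/RuledNotebook/AlloSphere | backend/reveal/clustering/kinetics.py | _find_episodes
-- ===== SOURCE A (Python) =====
-- def _find_episodes(sorted_frames: list[int]) -> list[list[int]]:
--     """Group consecutive frame indices into open episodes.
--
--     A gap of more than 1 frame signals a new episode.
--     """
--     if not sorted_frames:
--         return []
--     episodes: list[list[int]] = []
--     current: list[int] = [sorted_frames[0]]
--     for f in sorted_frames[1:]:
--         if f == current[-1] + 1:
--             current.append(f)
--         else:
--             episodes.append(current)
--             current = [f]
--     episodes.append(current)
--     return episodes
-- ===== SOURCE B (Python) =====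
-- def _find_episodes(sorted_frames: list[int]) -> list[list[int]]:
--     """Group consecutive frame indices into open episodes.
--
--     Built back-to-front: scan the frames in reverse and either prepend the
--     frame onto the first (earliest) episode collected so far, or open a new
--     episode in front of it.
--     """
--     episodes: list[list[int]] = []
--     for f in reversed(sorted_frames):
--         if episodes and episodes[0][0] == f + 1:
--             episodes[0].insert(0, f)
--         else:
--             episodes.insert(0, [f])
--     return episodes
-- ===== Notes on version B (the rewrite author's own statement) =====
-- stated objective: alternative
-- what changed: B builds the episode list back-to-front in a single reverse scan that prepends each frame onto the head episode of the output (or opens a new head episode), eliminating A's separate 'current' run buffer and final flush append.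
import Mathlib
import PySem

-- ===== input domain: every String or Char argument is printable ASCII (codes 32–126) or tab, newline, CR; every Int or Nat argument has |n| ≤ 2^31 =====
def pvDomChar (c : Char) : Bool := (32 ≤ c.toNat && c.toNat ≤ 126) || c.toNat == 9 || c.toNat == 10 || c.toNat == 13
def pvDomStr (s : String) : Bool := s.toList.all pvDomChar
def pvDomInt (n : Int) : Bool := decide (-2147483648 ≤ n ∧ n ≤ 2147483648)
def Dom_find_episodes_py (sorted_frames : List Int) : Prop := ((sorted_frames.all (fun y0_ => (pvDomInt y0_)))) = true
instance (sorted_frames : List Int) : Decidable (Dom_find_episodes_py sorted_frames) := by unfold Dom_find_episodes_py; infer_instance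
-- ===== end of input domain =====

-- B groups the frames back-to-front in one reverse scan (prepend onto the head
-- episode or open a new one) instead of A's forward loop with a separate
-- 'current' buffer flushed at the end; same return value on every input
-- (B's Python front insertions cost more on large inputs; no speed is claimed).

-- ===== PORT A =====
-- loop body of A: state = (episodes, current); current is always nonempty,
-- current[-1] is PySem.List.pyGet? _ (-1) (defaulted, never hit: some on nonempty lists)
def find_episodes_py_step (st : List (List Int) × List Int) (f : Int) :
    List (List Int) × List Int :=
  if f = (PySem.List.pyGet? st.2 (-1)).getD 0 + 1 then
    (st.1, st.2 ++ [f])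
  else
    (st.1 ++ [st.2], [f])

def find_episodes_py (sorted_frames : List Int) : List (List Int) :=
  match sorted_frames with
  | [] => []
  | f0 :: rest =>
    let st := rest.foldl find_episodes_py_step ([], [f0])
    st.1 ++ [st.2]

-- ===== PORT B =====
-- loop body of B (the reversed-iteration loop, as a foldr step):
-- prepend f to the first episode when it starts at f+1, else open a new episode
def find_episodes_py_alt_step (f : Int) (episodes : List (List Int)) :
    List (List Int) :=
  match episodes with
  | (g :: gs) :: rest =>
    if g = f + 1 then (f :: g :: gs) :: rest else [f] :: (g :: gs) :: rest
  | _ => [f] :: episodes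

def find_episodes_py_alt (sorted_frames : List Int) : List (List Int) :=
  sorted_frames.foldr find_episodes_py_alt_step []

-- ===== PRECONDITION & SPEC =====
def Spec_find_episodes_py (sorted_frames : List Int) (out : List (List Int)) : Prop := out = find_episodes_py_alt sorted_frames
instance (sorted_frames : List Int) (out : List (List Int)) : Decidable (Spec_find_episodes_py sorted_frames out) := by unfold Spec_find_episodes_py; infer_instance

-- ===== CLAIM (what is proved, stated in full; the proofs are below) =====
def Claim_equal_find_episodes_py : Prop := ∀ (sorted_frames : List Int), Dom_find_episodes_py sorted_frames → Spec_find_episodes_py sorted_frames (find_episodes_py sorted_frames)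

-- ===== LEMMAS AND PROOFS =====

-- proof-only characterisation: given the last frame c of the current run,
-- 'runs c fs' returns (rest of the current run, the complete runs after it)
def runs : Int → List Int → List Int × List (List Int)
  | _, [] => ([], [])
  | c, f :: fs =>
    if f = c + 1 then (f :: (runs f fs).1, (runs f fs).2)
    else ([], (f :: (runs f fs).1) :: (runs f fs).2)

theorem foldl_stepA (fs : List Int) :
    ∀ (episodes : List (List Int)) (pre : List Int) (c : Int),
    (let st := fs.foldl find_episodes_py_step (episodes, pre ++ [c])
     st.1 ++ [st.2]) =
    episodes ++ (pre ++ c :: (runs c fs).1) :: (runs c fs).2 := by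
  induction fs with
  | nil => intro episodes pre c; simp [runs]
  | cons f fs ih =>
    intro episodes pre c
    simp only [List.foldl_cons, find_episodes_py_step,
      PySem.List.pyGet?_neg_one_append_singleton, Option.getD_some, runs]
    by_cases h : f = c + 1
    · subst h
      simp only [if_pos rfl]
      have := ih episodes (pre ++ [c]) (c + 1)
      simpa using this
    · simp only [if_neg h]
      have := ih (episodes ++ [pre ++ [c]]) [] f
      simpa using this

theorem foldr_stepB (fs : List Int) :
    ∀ (c : Int),
    (c :: fs).foldr find_episodes_py_alt_step [] =
    (c :: (runs c fs).1) :: (runs c fs).2 := by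
  induction fs with
  | nil => intro c; simp [find_episodes_py_alt_step, runs]
  | cons f fs ih =>
    intro c
    have hf := ih f
    simp only [List.foldr_cons] at hf ⊢
    rw [hf]
    by_cases h : f = c + 1
    · simp [find_episodes_py_alt_step, runs, h]
    · simp [find_episodes_py_alt_step, runs, h]

-- ===== VERDICT (by name: the statement is the Claim_ definition above) =====
theorem find_episodes_py_spec : Claim_equal_find_episodes_py := by
  intro sorted_frames _
  unfold Spec_find_episodes_py
  cases sorted_frames with
  | nil => rfl
  | cons f0 rest =>
    show (let st := rest.foldl find_episodes_py_step ([], [f0]); st.1 ++ [st.2]) =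
      find_episodes_py_alt (f0 :: rest)
    have hA := foldl_stepA rest [] [] f0
    simp only [List.nil_append] at hA
    rw [hA]
    rw [find_episodes_py_alt, foldr_stepB rest f0]
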